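-- pv_equiv track=rewrite | github.com/ChetanPawar49/Python | Assignment-4/Q3.py | find_long_sequences
-- ===== SOURCE A (Python) =====
-- def find_long_sequences(sequence, base, threshold):
--     """Find sequences of consecutive base pairs longer than the threshold."""
--     long_sequences = []
--     current_sequence = []
--
--     for bp in sequence:
--         if bp == base:
--             current_sequence.append(bp)
--         else:
--             if len(current_sequence) > threshold:
--                 long_sequences.append(current_sequence.copy())
--             current_sequence = []
--
--     # Check at the end of the sequence
--     if len(current_sequence) > threshold:
--         long_sequences.append(current_sequence.copy())
--
--     return long_sequences
-- ===== SOURCE B (Python) =====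
-- def find_long_sequences(sequence, base, threshold):
--     """Find sequences of consecutive base pairs longer than the threshold."""
--     result = []
--     i, n = 0, len(sequence)
--     while i < n:
--         j = i
--         while j < n and sequence[j] == sequence[i]:
--             j += 1
--         if sequence[i] == base and j - i > threshold:
--             result.append(sequence[i:j])
--         i = j
--     return result
-- ===== Notes on version B (the rewrite author's own statement) =====
-- stated objective: alternative
-- what changed: Replaced the element-by-element accumulator loop with its mismatch-reset branch and trailing end-of-sequence check by a two-pointer scanner that finds each maximal run of equal elements and slices it out once, keeping only base runs longer than the threshold.
-- outside the precondition, e.g. on find_long_sequences(['C'], 'A', -1): A returns [[], []], B returns []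
import Mathlib
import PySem

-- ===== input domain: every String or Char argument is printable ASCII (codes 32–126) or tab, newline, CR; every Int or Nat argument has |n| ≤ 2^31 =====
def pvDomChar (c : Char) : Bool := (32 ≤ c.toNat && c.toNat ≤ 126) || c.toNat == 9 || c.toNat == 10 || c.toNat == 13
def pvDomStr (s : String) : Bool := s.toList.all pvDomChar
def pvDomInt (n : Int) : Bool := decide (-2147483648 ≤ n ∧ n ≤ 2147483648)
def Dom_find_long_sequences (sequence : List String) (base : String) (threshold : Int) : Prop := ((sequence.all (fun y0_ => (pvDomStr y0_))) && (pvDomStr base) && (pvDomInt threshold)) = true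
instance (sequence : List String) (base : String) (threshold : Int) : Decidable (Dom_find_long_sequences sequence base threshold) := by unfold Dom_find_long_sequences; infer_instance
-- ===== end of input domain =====

-- B replaces A's element-by-element accumulator loop by a two-pointer maximal-run scanner (alternative decomposition, same cost).


-- ===== PORT A =====
-- A's for-loop: state (long_sequences, current_sequence); final trailing check in the [] case.
def pvAgo (base : String) (threshold : Int) : List String → List (List String) → List String → List (List String)
  | [], long, cur => if (cur.length : Int) > threshold then long ++ [cur] else long
  | bp :: rest, long, cur =>
    if bp == base then pvAgo base threshold rest long (cur ++ [bp])
    else if (cur.length : Int) > threshold then pvAgo base threshold rest (long ++ [cur]) []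
    else pvAgo base threshold rest long []

def find_long_sequences (sequence : List String) (base : String) (threshold : Int) : List (List String) :=
  pvAgo base threshold sequence [] []

-- ===== PORT B =====
-- B's two-pointer scanner: the inner while advancing j over equal elements is the span,
-- sequence[i:j] is x :: run, and the outer loop continues at j (the rest).
def find_long_sequences_alt (sequence : List String) (base : String) (threshold : Int) : List (List String) :=
  match sequence with
  | [] => []
  | x :: xs =>
    let run := xs.takeWhile (· == x)
    let rest := xs.dropWhile (· == x)
    (if x == base && decide (((run.length : Int) + 1) > threshold) then [x :: run] else []) ++
      find_long_sequences_alt rest base threshold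
termination_by sequence.length
decreasing_by
  simp only [List.length_cons]
  exact Nat.lt_succ_of_le (List.length_dropWhile_le _ _)

-- ===== PRECONDITION & SPEC =====
-- Pre_ restricts to the natural domain of a run-length threshold: 0 ≤ threshold. For negative
-- thresholds A still returns, but appends a spurious empty run for every non-base element
-- (len([]) > threshold holds), which B's run scanner naturally never produces.
def Pre_find_long_sequences (sequence : List String) (base : String) (threshold : Int) : Prop := 0 ≤ threshold
instance (sequence : List String) (base : String) (threshold : Int) : Decidable (Pre_find_long_sequences sequence base threshold) := by unfold Pre_find_long_sequences; infer_instance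

def pvWitness_find_long_sequences : List String × String × Int := (["A", "A", "B", "A"], "A", 1)

def Spec_find_long_sequences (sequence : List String) (base : String) (threshold : Int) (out : List (List String)) : Prop := out = find_long_sequences_alt sequence base threshold
instance (sequence : List String) (base : String) (threshold : Int) (out : List (List String)) : Decidable (Spec_find_long_sequences sequence base threshold out) := by unfold Spec_find_long_sequences; infer_instance

-- ===== CLAIM (what is proved, stated in full; the proofs are below) =====
def Claim_equal_find_long_sequences : Prop := ∀ (sequence : List String) (base : String) (threshold : Int), Dom_find_long_sequences sequence base threshold → Pre_find_long_sequences sequence base threshold → Spec_find_long_sequences sequence base threshold (find_long_sequences sequence base threshold)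

-- ===== LEMMAS AND PROOFS =====

-- Common reference function: recursion over the list carrying the length of the current base run.
def pvF (base : String) (threshold : Int) : List String → Nat → List (List String)
  | [], k => if (k : Int) > threshold then [List.replicate k base] else []
  | x :: xs, k =>
    if x == base then pvF base threshold xs (k + 1)
    else (if (k : Int) > threshold then [List.replicate k base] else []) ++ pvF base threshold xs 0

theorem pvAgo_eq_pvF (base : String) (threshold : Int) :
    ∀ (l : List String) (long : List (List String)) (k : Nat),
      pvAgo base threshold l long (List.replicate k base) = long ++ pvF base threshold l k := by
  intro l
  induction l with
  | nil =>
    intro long k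
    simp only [pvAgo, pvF, List.length_replicate]
    split <;> simp
  | cons bp rest ih =>
    intro long k
    simp only [pvAgo, pvF]
    by_cases h : bp = base
    · subst h
      simp only [beq_self_eq_true, if_true]
      have : List.replicate k bp ++ [bp] = List.replicate (k + 1) bp := by
        simp [List.replicate_succ']
      rw [this, ih]
    · simp only [beq_eq_false_iff_ne.mpr h, Bool.false_eq_true, if_false,
        List.length_replicate]
      split
      · rw [show ([] : List String) = List.replicate 0 base from rfl, ih]
        simp
      · rw [show ([] : List String) = List.replicate 0 base from rfl, ih]
        simp

theorem pvF_replicate_base (base : String) (threshold : Int) :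
    ∀ (r : List String), (∀ y ∈ r, y = base) → ∀ (rest : List String) (k : Nat),
      pvF base threshold (r ++ rest) k = pvF base threshold rest (k + r.length) := by
  intro r
  induction r with
  | nil => intro _ rest k; simp
  | cons y t ih =>
    intro hy rest k
    have hyb : y = base := hy y (by simp)
    simp only [List.cons_append, pvF, hyb, beq_self_eq_true, if_true]
    rw [ih (fun z hz => hy z (by simp [hz])) rest (k + 1)]
    congr 1
    simp [List.length_cons]
    omega

theorem pvF_skip (base : String) (threshold : Int) (hth : 0 ≤ threshold) (x : String)
    (hx : x ≠ base) :
    ∀ (r : List String), (∀ y ∈ r, y = x) → ∀ (rest : List String),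
      pvF base threshold (r ++ rest) 0 = pvF base threshold rest 0 := by
  intro r
  induction r with
  | nil => intro _ rest; simp
  | cons y t ih =>
    intro hy rest
    have hyx : y = x := hy y (by simp)
    have hyb : (y == base) = false := beq_eq_false_iff_ne.mpr (hyx ▸ hx)
    simp only [List.cons_append, pvF, hyb, Bool.false_eq_true, if_false, Nat.cast_zero]
    have h0 : ¬ ((0 : Int) > threshold) := by omega
    rw [if_neg h0, List.nil_append, ih (fun z hz => hy z (by simp [hz])) rest]

theorem pvF_flush (base : String) (threshold : Int) (hth : 0 ≤ threshold) :
    ∀ (rest : List String), (∀ y, rest.head? = some y → (y == base) = false) → ∀ (m : Nat),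
      pvF base threshold rest m =
        (if (m : Int) > threshold then [List.replicate m base] else []) ++ pvF base threshold rest 0 := by
  intro rest hrest m
  match rest with
  | [] =>
    simp only [pvF, Nat.cast_zero]
    have h0 : ¬ ((0 : Int) > threshold) := by omega
    rw [if_neg h0]
    simp
  | y :: ys =>
    have hyb : (y == base) = false := hrest y rfl
    simp only [pvF, hyb, Bool.false_eq_true, if_false, Nat.cast_zero]
    have h0 : ¬ ((0 : Int) > threshold) := by omega
    rw [if_neg h0]
    simp

theorem head?_dropWhile_beq_false (x : String) :
    ∀ (xs : List String) (y : String), (xs.dropWhile (· == x)).head? = some y → (y == x) = false := by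
  intro xs
  induction xs with
  | nil => intro y h; simp at h
  | cons a t ih =>
    intro y h
    by_cases ha : a = x
    · rw [List.dropWhile_cons_of_pos (by simp [ha])] at h
      exact ih y h
    · rw [List.dropWhile_cons_of_neg (by simp [ha])] at h
      simp at h
      subst h
      exact beq_eq_false_iff_ne.mpr ha

theorem alt_eq_pvF (base : String) (threshold : Int) (hth : 0 ≤ threshold) :
    ∀ (l : List String), find_long_sequences_alt l base threshold = pvF base threshold l 0 := by
  intro l
  induction l using find_long_sequences_alt.induct with
  | case1 =>
    simp only [find_long_sequences_alt, pvF, Nat.cast_zero]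
    have h0 : ¬ ((0 : Int) > threshold) := by omega
    rw [if_neg h0]
  | case2 x xs rest ih =>
    rw [show rest = xs.dropWhile (· == x) from rfl] at ih
    simp only [find_long_sequences_alt]
    have hxsplit : xs = xs.takeWhile (· == x) ++ xs.dropWhile (· == x) :=
      (List.takeWhile_append_dropWhile).symm
    have hmem : ∀ y ∈ xs.takeWhile (· == x), y = x := by
      intro y hy
      exact eq_of_beq (List.mem_takeWhile_imp (l := xs) (p := fun z => z == x) hy)
    by_cases hx : x = base
    · subst hx
      conv_rhs => rw [hxsplit]
      rw [show (x :: (xs.takeWhile (· == x) ++ xs.dropWhile (· == x))) =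
            (x :: xs.takeWhile (· == x)) ++ xs.dropWhile (· == x) from rfl]
      rw [pvF_replicate_base x threshold (x :: xs.takeWhile (· == x))
            (by intro y hy; rcases List.mem_cons.mp hy with h | h; exact h; exact hmem y h)
            (xs.dropWhile (· == x)) 0]
      rw [pvF_flush x threshold hth (xs.dropWhile (· == x))
            (fun y hy => head?_dropWhile_beq_false x xs y hy)]
      rw [ih]
      congr 1
      simp only [beq_self_eq_true, Bool.true_and, List.length_cons, Nat.zero_add]
      have hrepl : List.replicate (xs.takeWhile (· == x)).length x = xs.takeWhile (· == x) :=
        (List.eq_replicate_of_mem hmem).symm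
      by_cases hgt : ((xs.takeWhile (· == x)).length : Int) + 1 > threshold
      · rw [if_pos (decide_eq_true hgt), if_pos (by push_cast; exact hgt)]
        rw [List.replicate_succ, hrepl]
      · rw [if_neg (by simpa using hgt), if_neg (by push_cast; exact hgt)]
    · have hxb : (x == base) = false := beq_eq_false_iff_ne.mpr hx
      simp only [hxb, Bool.false_and, Bool.false_eq_true, if_false, List.nil_append]
      rw [ih]
      conv_rhs => rw [show (x :: xs) = (x :: xs.takeWhile (· == x)) ++ xs.dropWhile (· == x) by
        rw [List.cons_append, ← hxsplit]]
      rw [pvF_skip base threshold hth x hx (x :: xs.takeWhile (· == x))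
            (by intro y hy; rcases List.mem_cons.mp hy with h | h; exact h; exact hmem y h)
            (xs.dropWhile (· == x))]

-- ===== VERDICT (by name: the statement is the Claim_ definition above) =====
theorem find_long_sequences_spec : Claim_equal_find_long_sequences := by
  intro sequence base threshold _ hpre
  unfold Spec_find_long_sequences find_long_sequences
  rw [show ([] : List String) = List.replicate 0 base from rfl,
      pvAgo_eq_pvF base threshold sequence [] 0, List.nil_append,
      alt_eq_pvF base threshold hpre sequence]
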